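-- pv_equiv track=rewrite | github.com/luuck25/DSA-Python | HashMaps/LargestUniqueNum.py | largest_uni_num
-- ===== SOURCE A (Python) =====
-- def largest_uni_num(nums):
--
--     # Pass 1: Count frequency of every number
--     freq = {}
--
--     for num in nums:
--         freq[num] = freq.get(num, 0) + 1
--
--     # Start with -infinity so any real number beats it
--     largest_num = float('-inf')
--
--     # Pass 2: Find the largest number that appears exactly once
--     for num in nums:
--
--         if freq[num] == 1:
--             largest_num = max(largest_num, num)
--
--     # If largest_num is still -inf, no unique number was found
--     return -1 if largest_num == float('-inf') else largest_num
-- ===== SOURCE B (Python) =====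
-- def largest_uni_num(nums):
--     # Sort a copy, then scan runs of equal adjacent values; the last run of
--     # length 1 (in ascending order) is the largest value occurring exactly once.
--     s = sorted(nums)
--     n = len(s)
--     res = -1
--     i = 0
--     while i < n:
--         j = i + 1
--         while j < n and s[j] == s[i]:
--             j += 1
--         if j == i + 1:
--             res = s[i]
--         i = j
--     return res
-- ===== Notes on version B (the rewrite author's own statement) =====
-- stated objective: faster
-- what changed: Replaces the two dict passes (build a frequency map, then re-scan taking a running max of count-1 elements) by sorting a copy and doing one run-length scan of the sorted list, where the last length-1 run is the answer.
import Mathlib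
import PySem

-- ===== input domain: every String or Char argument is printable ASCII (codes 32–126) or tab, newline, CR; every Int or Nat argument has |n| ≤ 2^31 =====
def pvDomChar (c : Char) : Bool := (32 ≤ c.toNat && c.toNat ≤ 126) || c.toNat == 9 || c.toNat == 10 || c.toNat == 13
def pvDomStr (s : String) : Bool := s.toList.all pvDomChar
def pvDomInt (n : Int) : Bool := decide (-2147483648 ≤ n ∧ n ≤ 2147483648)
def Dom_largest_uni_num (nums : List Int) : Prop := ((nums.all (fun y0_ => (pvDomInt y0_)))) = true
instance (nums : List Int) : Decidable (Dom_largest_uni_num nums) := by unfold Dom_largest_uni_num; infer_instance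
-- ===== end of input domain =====

-- B replaces A's two dict passes (frequency map, then running max over count-1 elements)
-- by sorting a copy and scanning runs of equal adjacent values once; return value only,
-- neither version mutates its argument.


-- ===== PORT A =====
-- helper naming A's fold step `max(largest_num, num)`; `none` models float('-inf'),
-- so max(-inf, num) = num — exact, since every other value compared is an Int
def pvMax2 (acc : Option Int) (num : Int) : Option Int :=
  some (match acc with | none => num | some m => max m num)

def largest_uni_num (nums : List Int) : Int :=
  -- Pass 1: freq[num] = freq.get(num, 0) + 1
  let freq := nums.foldl (fun d num => d.insert num (d.getD num 0 + 1)) (PySem.Dict.empty : PySem.Dict Int Int)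
  -- Pass 2: running max over numbers whose count is 1 (largest_num starts at -inf = none)
  let largest : Option Int :=
    nums.foldl (fun acc num => if freq.getD num 0 == 1 then pvMax2 acc num else acc) none
  -- -1 if largest_num == float('-inf') else largest_num
  match largest with
  | none => -1
  | some v => v

-- ===== PORT B =====
-- Source B's outer while loop: each step consumes the whole run of elements equal to the
-- head of the sorted remainder (the inner `while j` loop = takeWhile/dropWhile), and a
-- run of length exactly 1 (j == i + 1) overwrites res
def pvRunScan : List Int → Int → Int
  | [], res => res
  | x :: rest, res =>
      pvRunScan (rest.dropWhile (fun y => y == x))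
        (if (rest.takeWhile (fun y => y == x)).length == 0 then x else res)
termination_by l _ => l.length
decreasing_by
  exact Nat.lt_succ_of_le (List.length_dropWhile_le _ rest)

def largest_uni_num_alt (nums : List Int) : Int :=
  pvRunScan (PySem.List.sorted nums (fun x => x) false) (-1)

-- ===== PRECONDITION & SPEC =====
def Spec_largest_uni_num (nums : List Int) (out : Int) : Prop := out = largest_uni_num_alt nums
instance (nums : List Int) (out : Int) : Decidable (Spec_largest_uni_num nums out) := by unfold Spec_largest_uni_num; infer_instance

-- ===== CLAIM (what is proved, stated in full; the proofs are below) =====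
def Claim_equal_largest_uni_num : Prop := ∀ (nums : List Int), Dom_largest_uni_num nums → Spec_largest_uni_num nums (largest_uni_num nums)

-- ===== LEMMAS AND PROOFS =====

-- A's guarded fold is the unguarded fold over the filtered list
lemma foldl_if_filter (p : Int → Bool) (f : Option Int → Int → Option Int) :
    ∀ (l : List Int) (acc : Option Int),
      l.foldl (fun a x => if p x then f a x else a) acc = (l.filter p).foldl f acc := by
  intro l
  induction l with
  | nil => intro acc; rfl
  | cons x t ih =>
      intro acc
      cases hpx : p x <;> simp [hpx, ih]

lemma pvMax2_right_comm (acc : Option Int) (x y : Int) :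
    pvMax2 (pvMax2 acc x) y = pvMax2 (pvMax2 acc y) x := by
  cases acc with
  | none => simp [pvMax2, max_comm]
  | some m => simp [pvMax2, max_right_comm]

-- the running max is invariant under permutation of the list
lemma foldl_pvMax2_perm {l₁ l₂ : List Int} (h : l₁.Perm l₂) :
    ∀ acc, l₁.foldl pvMax2 acc = l₂.foldl pvMax2 acc := by
  induction h with
  | nil => intro acc; rfl
  | cons x _ ih => intro acc; simpa using ih (pvMax2 acc x)
  | swap x y l => intro acc; simp [List.foldl, pvMax2_right_comm]
  | trans _ _ ih₁ ih₂ => intro acc; rw [ih₁, ih₂]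

lemma foldl_pvMax2_asc_aux :
    ∀ (l : List Int), l.Pairwise (· ≤ ·) → ∀ m : Int, (∀ y ∈ l, m ≤ y) →
      l.foldl pvMax2 (some m) = some (l.getLast?.getD m) := by
  intro l
  induction l with
  | nil => intro _ m _; rfl
  | cons y t ih =>
      intro hp m hm
      rw [List.pairwise_cons] at hp
      have hmy : m ≤ y := hm y (List.mem_cons_self)
      have h1 : pvMax2 (some m) y = some y := by simp [pvMax2, max_eq_right hmy]
      simp only [List.foldl, h1]
      rw [ih hp.2 y hp.1, List.getLast?_cons]
      simp

-- on an ascending list the running max is the last element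
lemma foldl_pvMax2_asc (l : List Int) (hp : l.Pairwise (· ≤ ·)) :
    l.foldl pvMax2 none = l.getLast? := by
  cases l with
  | nil => rfl
  | cons x t =>
      rw [List.pairwise_cons] at hp
      have h0 : pvMax2 none x = some x := rfl
      simp only [List.foldl, h0]
      rw [foldl_pvMax2_asc_aux t hp.2 x hp.1, List.getLast?_cons]

-- in an ascending list whose elements are all ≥ x, everything after the runs of x is > x
lemma sorted_dropWhile_gt (x : Int) :
    ∀ (l : List Int), (∀ y ∈ l, x ≤ y) → l.Pairwise (· ≤ ·) →
      ∀ y ∈ l.dropWhile (fun y => y == x), x < y := by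
  intro l
  induction l with
  | nil => simp
  | cons z t ih =>
      intro h1 h2
      rw [List.pairwise_cons] at h2
      simp only [List.dropWhile_cons]
      by_cases hz : (z == x) = true
      · rw [if_pos hz]
        exact ih (fun y hy => h1 y (List.mem_cons_of_mem z hy)) h2.2
      · rw [if_neg hz]
        intro y hy
        have hxz : x < z := by
          have := h1 z List.mem_cons_self
          have hne : z ≠ x := by simpa using hz
          omega
        rcases List.mem_cons.mp hy with rfl | hmem
        · exact hxz
        · exact lt_of_lt_of_le hxz (h2.1 y hmem)

-- the run scan over an ascending list returns the last element occurring exactly once,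
-- or `res` if there is none
lemma pvRunScan_eq_aux :
    ∀ (n : Nat) (s : List Int), s.length ≤ n → s.Pairwise (· ≤ ·) → ∀ res : Int,
      pvRunScan s res = ((s.filter (fun x => s.count x == 1)).getLast?).getD res := by
  intro n
  induction n with
  | zero =>
      intro s hn _ res
      have : s = [] := List.eq_nil_of_length_eq_zero (Nat.le_zero.mp hn)
      subst this
      simp [pvRunScan]
  | succ n ih =>
      intro s hn hp res
      cases s with
      | nil => simp [pvRunScan]
      | cons x rest =>
          rw [List.pairwise_cons] at hp
          obtain ⟨run, rest', hrundef, hrest'def⟩ :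
              ∃ run rest', run = rest.takeWhile (fun y => y == x) ∧
                rest' = rest.dropWhile (fun y => y == x) := ⟨_, _, rfl, rfl⟩
          have hsplit : run ++ rest' = rest := by
            rw [hrundef, hrest'def]; exact List.takeWhile_append_dropWhile
          have hrun : ∀ y ∈ run, y = x := by
            intro y hy
            rw [hrundef] at hy
            exact beq_iff_eq.mp (List.mem_takeWhile_imp (p := fun y => y == x) hy)
          have hgt : ∀ y ∈ rest', x < y := by
            rw [hrest'def]
            exact sorted_dropWhile_gt x rest hp.1 hp.2
          have hsuffix : rest' <:+ rest := by
            rw [hrest'def]; exact List.dropWhile_suffix _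
          have hp' : rest'.Pairwise (· ≤ ·) :=
            List.Pairwise.sublist hsuffix.sublist hp.2
          have hxnot' : x ∉ rest' := fun h => lt_irrefl x (hgt x h)
          have hcountx : (x :: rest).count x = 1 + run.length := by
            have h1 : run.count x = run.length := by
              rw [List.eq_replicate_of_mem hrun]; simp
            have h2 : rest'.count x = 0 := List.count_eq_zero.mpr hxnot'
            rw [List.count_cons, ← hsplit, List.count_append, h1, h2]
            simp only [beq_self_eq_true, if_true]
            omega
          have hcounty : ∀ y ∈ rest', (x :: rest).count y = rest'.count y := by
            intro y hy
            have hyx : (x == y) = false := by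
              have := hgt y hy; simp; omega
            have hynotrun : y ∉ run := by
              intro hmem
              exact absurd (hrun y hmem) (by have := hgt y hy; omega)
            rw [List.count_cons, ← hsplit, List.count_append,
              List.count_eq_zero.mpr hynotrun, hyx]
            simp
          set p := (fun y => List.count y (x :: rest) == 1) with hpdef
          have hfiltrest' : rest'.filter p
              = rest'.filter (fun y => rest'.count y == 1) := by
            apply List.filter_congr
            intro y hy
            show (List.count y (x :: rest) == 1) = (rest'.count y == 1)
            rw [hcounty y hy]
          have hrest'len : rest'.length ≤ n := by
            have h1 : rest'.length ≤ rest.length := by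
              rw [hrest'def]; exact List.length_dropWhile_le _ _
            rw [List.length_cons] at hn
            omega
          have hih := ih rest' hrest'len hp'
          by_cases hre : run.length = 0
          · -- singleton run: x occurs exactly once; res is overwritten by x
            have hrunnil : run = [] := List.eq_nil_of_length_eq_zero hre
            have hrest : rest = rest' := by
              rw [hrunnil] at hsplit; simpa using hsplit.symm
            have hpx : p x = true := by
              show (List.count x (x :: rest) == 1) = true
              rw [hcountx, hre]
              decide
            have hstep : pvRunScan (x :: rest) res = pvRunScan rest' x := by
              rw [pvRunScan, ← hrundef, ← hrest'def, hre]
              norm_num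
            rw [hstep, hih x, List.filter_cons, if_pos hpx, List.getLast?_cons,
              Option.getD_some, hrest, hfiltrest']
          · -- longer run: x and its copies are filtered out; res is kept
            have hpx : p x = false := by
              show (List.count x (x :: rest) == 1) = false
              rw [hcountx, beq_eq_false_iff_ne]
              omega
            have hfiltrun : run.filter p = [] := by
              rw [List.filter_eq_nil_iff]
              intro y hy
              rw [hrun y hy, hpx]; simp
            have hstep : pvRunScan (x :: rest) res = pvRunScan rest' res := by
              rw [pvRunScan, ← hrundef, ← hrest'def]
              simp [hre]
            have hfsplit : rest.filter p = rest'.filter p := by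
              rw [← hsplit, List.filter_append, hfiltrun, List.nil_append]
            rw [hstep, hih res, List.filter_cons, hpx]
            simp only [Bool.false_eq_true, if_false]
            rw [hfsplit, hfiltrest']

-- ===== VERDICT (by name: the statement is the Claim_ definition above) =====
theorem largest_uni_num_spec : Claim_equal_largest_uni_num := by
  intro nums _
  unfold Spec_largest_uni_num
  set s := PySem.List.sorted nums (fun x => x) false with hsdef
  have hperm : s.Perm nums := PySem.List.sorted_perm nums (fun x => x) false
  have hpair : s.Pairwise (· ≤ ·) := by
    have := PySem.List.sorted_pairwise nums (fun x : Int => x)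
    simpa using this
  have hAdef : largest_uni_num nums =
      (match nums.foldl (fun acc num =>
          if (nums.foldl (fun d num => d.insert num (d.getD num 0 + 1))
                (PySem.Dict.empty : PySem.Dict Int Int)).getD num 0 == 1 then pvMax2 acc num else acc) none with
        | none => -1
        | some v => v) := rfl
  have hBdef : largest_uni_num_alt nums = pvRunScan s (-1) := rfl
  -- A's second pass, rewritten step by step
  have hA :
      nums.foldl (fun acc num =>
          if (nums.foldl (fun d num => d.insert num (d.getD num 0 + 1))
                (PySem.Dict.empty : PySem.Dict Int Int)).getD num 0 == 1 then pvMax2 acc num else acc) none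
        = (s.filter (fun y => s.count y == 1)).getLast? := by
    have h1 : (fun (acc : Option Int) (num : Int) =>
        if (nums.foldl (fun d num => d.insert num (d.getD num 0 + 1))
              (PySem.Dict.empty : PySem.Dict Int Int)).getD num 0 == 1 then pvMax2 acc num else acc)
        = (fun acc num => if nums.count num == 1 then pvMax2 acc num else acc) := by
      funext acc num
      have hc : ((nums.foldl (fun d num => d.insert num (d.getD num 0 + 1))
            (PySem.Dict.empty : PySem.Dict Int Int)).getD num 0 == 1) = (nums.count num == 1) := by
        rw [PySem.Dict.foldl_insert_getD_add_one_eq_counter,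
          PySem.Dict.getD_counter]
        simp only [beq_eq_decide]
        exact decide_eq_decide.mpr (by omega)
      rw [hc]
    rw [h1, foldl_if_filter]
    have hpermfilter :
        (nums.filter (fun y => nums.count y == 1)).Perm
          (s.filter (fun y => nums.count y == 1)) :=
      (hperm.filter (fun y => nums.count y == 1)).symm
    rw [foldl_pvMax2_perm hpermfilter]
    have hcong : s.filter (fun y => nums.count y == 1)
        = s.filter (fun y => s.count y == 1) := by
      apply List.filter_congr
      intro y _
      rw [hperm.count_eq y]
    rw [hcong]
    exact foldl_pvMax2_asc _ (List.Pairwise.sublist List.filter_sublist hpair)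
  rw [hAdef, hA, hBdef, pvRunScan_eq_aux s.length s (Nat.le_refl _) hpair (-1)]
  cases h : (s.filter (fun y => s.count y == 1)).getLast? <;> simp
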